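-- pv_equiv track=rewrite | github.com/seanwon1217/Test1Corrections | Test1.py | create_protein_dict
-- ===== SOURCE A (Python) =====
-- def create_protein_dict(proteins):
--     protein_counts = {}
--     for protein in proteins:
--         if protein.split('.')[0] in protein_counts.keys():
--             protein_counts[protein.split('.')[0]] += 1
--         else:
--             protein_counts[protein.split('.')[0]] = 1
--     return protein_counts
-- ===== SOURCE B (Python) =====
-- def create_protein_dict(proteins):
--     result = {}
--     ps = [p.split('.')[0] for p in proteins]
--     while ps:
--         k = ps[0]
--         rest = [x for x in ps if x != k]
--         result[k] = len(ps) - len(rest)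
--         ps = rest
--     return result
-- ===== Notes on version B (the rewrite author's own statement) =====
-- stated objective: alternative
-- what changed: Replaces the single-pass hash-increment counting with a repeated-partition loop: take the first remaining prefix, obtain its count as the length drop after filtering it out, and continue on the filtered remainder; no per-element dict updates at all.
import Mathlib
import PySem

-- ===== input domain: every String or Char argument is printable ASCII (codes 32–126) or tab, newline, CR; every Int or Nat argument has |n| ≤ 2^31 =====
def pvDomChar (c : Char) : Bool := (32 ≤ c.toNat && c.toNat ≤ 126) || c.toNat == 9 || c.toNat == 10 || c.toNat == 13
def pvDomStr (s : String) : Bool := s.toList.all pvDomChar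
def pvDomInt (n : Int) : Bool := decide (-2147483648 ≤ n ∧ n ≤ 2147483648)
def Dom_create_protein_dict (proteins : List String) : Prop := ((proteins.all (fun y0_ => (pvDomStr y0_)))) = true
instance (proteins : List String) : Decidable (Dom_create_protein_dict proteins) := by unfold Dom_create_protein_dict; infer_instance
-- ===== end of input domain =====

-- B replaces A's single-pass hash-increment counting by a repeated-partition loop
-- (count the first remaining prefix via the length drop after filtering it out, recurse
-- on the remainder); alternative algorithm, same return value.


-- ===== PORT A =====
-- prefix extraction: protein.split('.')[0]  (split('.') is never empty, so [0] never raises)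
def pvPrefix (p : String) : String :=
  (((PySem.Str.split? p ".").getD []).getD 0 "")

def create_protein_dict (proteins : List String) : List (String × Int) :=
  (proteins.foldl
    (fun d p =>
      let k := pvPrefix p
      if d.contains k then d.insert k (d.getD k 0 + 1) else d.insert k 1)
    PySem.Dict.empty).items

-- ===== PORT B =====
-- the while loop of Source B; result[k] = … always sets a FRESH key (k was filtered out of
-- every later ps), so the dict insertion is exactly an append to the items list
def pvGoAlt (result : List (String × Int)) (ps : List String) : List (String × Int) :=
  match ps with
  | [] => result
  | k :: t =>
    let rest := (k :: t).filter (fun x => x ≠ k)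
    pvGoAlt (result ++ [(k, ((k :: t).length : Int) - (rest.length : Int))]) rest
  termination_by ps.length
  decreasing_by
    simp
    exact List.length_filter_le _ _

def create_protein_dict_alt (proteins : List String) : List (String × Int) :=
  pvGoAlt [] (proteins.map pvPrefix)

-- ===== PRECONDITION & SPEC =====
def Spec_create_protein_dict (proteins : List String) (out : List (String × Int)) : Prop := out = create_protein_dict_alt proteins
instance (proteins : List String) (out : List (String × Int)) : Decidable (Spec_create_protein_dict proteins out) := by unfold Spec_create_protein_dict; infer_instance

-- ===== CLAIM (what is proved, stated in full; the proofs are below) =====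
def Claim_equal_create_protein_dict : Prop := ∀ (proteins : List String), Dom_create_protein_dict proteins → Spec_create_protein_dict proteins (create_protein_dict proteins)

-- ===== LEMMAS AND PROOFS =====

-- A's branchy update step is the Counter step
lemma pv_step_eq (d : PySem.Dict String Int) (k : String) :
    (if d.contains k then d.insert k (d.getD k 0 + 1) else d.insert k 1)
      = d.insert k (d.getD k 0 + 1) := by
  by_cases h : d.contains k
  · simp [h]
  · rw [PySem.Dict.getD_of_not_contains (h := by simpa using h)]
    simp [h]

lemma pv_add_cons {a x : String} (s : List String) (h : x ≠ a) :
    PySem.Set.add (a :: s) x = a :: PySem.Set.add s x := by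
  by_cases hm : x ∈ s
  · simp [PySem.Set.add, hm, h]
  · simp [PySem.Set.add, hm, h]

lemma pv_foldl_add_cons (a : String) (s ys : List String) (h : ∀ x ∈ ys, x ≠ a) :
    List.foldl PySem.Set.add (a :: s) ys = a :: List.foldl PySem.Set.add s ys := by
  induction ys generalizing s with
  | nil => rfl
  | cons y ys ih =>
    simp only [List.foldl_cons]
    rw [pv_add_cons s (h y (by simp)), ih _ (fun x hx => h x (by simp [hx]))]

lemma pv_foldl_add_skip (acc : List String) (ys : List String) (a : String) (ha : a ∈ acc) :
    List.foldl PySem.Set.add acc ys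
      = List.foldl PySem.Set.add acc (ys.filter (fun x => x ≠ a)) := by
  induction ys generalizing acc with
  | nil => rfl
  | cons y ys ih =>
    simp only [List.filter_cons]
    by_cases hy : y = a
    · subst hy
      have hadd : PySem.Set.add acc y = acc := by simp [PySem.Set.add, ha]
      simpa [hadd] using ih acc ha
    · have hd : (decide (y ≠ a)) = true := by simp [hy]
      simp only [hd, if_true, List.foldl_cons]
      apply ih
      simp only [PySem.Set.add]
      split_ifs <;> simp [ha]

-- first-occurrence dedup unfolds as: head, then dedup of the tail with the head filtered out
lemma pv_ofList_cons (k : String) (t : List String) :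
    PySem.Set.ofList (k :: t) = k :: PySem.Set.ofList (t.filter (fun x => x ≠ k)) := by
  unfold PySem.Set.ofList
  simp only [List.foldl_cons]
  have h1 : PySem.Set.add PySem.Set.empty k = [k] := rfl
  rw [h1, pv_foldl_add_skip [k] t k (by simp),
      pv_foldl_add_cons k [] _ (fun x hx => by simpa using (List.mem_filter.mp hx).2)]
  rfl

-- the loop of B computes exactly Counter-as-items
lemma pv_goAlt_eq (ps : List String) (acc : List (String × Int)) :
    pvGoAlt acc ps
      = acc ++ (PySem.Set.ofList ps).map (fun k => (k, (ps.count k : Int))) := by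
  induction hn : ps.length using Nat.strong_induction_on generalizing ps acc with
  | _ n ih =>
    match ps with
    | [] => rw [pvGoAlt.eq_def]; simp [PySem.Set.ofList, PySem.Set.empty]
    | k :: t =>
      rw [pvGoAlt.eq_def]
      dsimp only
      have hrest : (k :: t).filter (fun x => x ≠ k) = t.filter (fun x => x ≠ k) := by
        simp
      have hlen : (t.filter (fun x => x ≠ k)).length < n := by
        subst hn
        simpa using Nat.lt_succ_of_le (List.length_filter_le _ _)
      rw [hrest, ih _ hlen _ _ rfl, pv_ofList_cons]
      have hsplit := List.length_eq_length_filter_add (l := k :: t) (fun x => decide (x ≠ k))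
      rw [hrest] at hsplit
      have hc : (k :: t).count k = ((k :: t).filter (fun x => !decide (x ≠ k))).length := by
        rw [List.count_eq_length_filter]
        congr 1
        apply List.filter_congr
        intro x _
        rw [Bool.beq_eq_decide_eq]
        simp [eq_comm]
      have hcount : ((k :: t).length : Int) - ((t.filter (fun x => x ≠ k)).length : Int)
          = ((k :: t).count k : Int) := by
        rw [hc, hsplit]
        push_cast
        ring
      rw [hcount]
      have hmap : ∀ k' ∈ PySem.Set.ofList (t.filter (fun x => x ≠ k)),
          ((t.filter (fun x => x ≠ k)).count k' : Int) = ((k :: t).count k' : Int) := by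
        intro k' hk'
        have hne : k' ≠ k := by
          have := (PySem.Set.mem_ofList _ _).mp hk'
          simpa using (List.mem_filter.mp this).2
        have h4 : (t.filter (fun x => x ≠ k)).count k' = t.count k' := by
          rw [List.count_filter (by simp [hne])]
        rw [h4]
        simp [List.count_cons]
        exact fun e => hne e.symm
      simp only [List.map_cons, List.append_assoc, List.singleton_append]
      congr 2
      exact List.map_congr_left (fun k' hk' => by rw [hmap k' hk'])

-- ===== VERDICT (by name: the statement is the Claim_ definition above) =====
theorem create_protein_dict_spec : Claim_equal_create_protein_dict := by
  intro proteins _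
  unfold Spec_create_protein_dict create_protein_dict create_protein_dict_alt
  simp only [pv_step_eq]
  rw [← List.foldl_map (f := pvPrefix)
        (g := fun (d : PySem.Dict String Int) x => d.insert x (d.getD x 0 + 1))
        (l := proteins) (init := PySem.Dict.empty),
    PySem.Dict.foldl_insert_getD_add_one_eq_counter, PySem.Dict.items_counter,
    pv_goAlt_eq]
  simp
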